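-- pv_equiv track=rewrite | github.com/br-wa/pz-parallelism | circuits/gen_millionaire.py | get_v2_and_idx
-- ===== SOURCE A (Python) =====
-- def get_v2_and_idx (i):
--     v2 = 0
--     i_copy = i
--     tp = 1
--     while i_copy % 2 == 0:
--         v2 += 1
--         i_copy //= 2
--         tp *= 2
--     return (v2, i - tp)
-- ===== SOURCE B (Python) =====
-- def get_v2_and_idx(i):
--     tp = i & -i
--     return (tp.bit_length() - 1, i - tp)
-- ===== Notes on version B (the rewrite author's own statement) =====
-- stated objective: alternative
-- what changed: The halving loop that counts factors of two is replaced by the closed-form bit trick: tp = i & -i isolates the lowest set bit (Python's infinite two's-complement & makes this exact for negative i too), v2 = tp.bit_length() minus one, returning (v2, i - tp) with no loop; Pre_ excludes only i = 0, on which A's while-loop never terminates.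
-- outside the precondition, e.g. on get_v2_and_idx(0): A does not finish within the time limit, B returns (-1, 0)
import Mathlib
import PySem

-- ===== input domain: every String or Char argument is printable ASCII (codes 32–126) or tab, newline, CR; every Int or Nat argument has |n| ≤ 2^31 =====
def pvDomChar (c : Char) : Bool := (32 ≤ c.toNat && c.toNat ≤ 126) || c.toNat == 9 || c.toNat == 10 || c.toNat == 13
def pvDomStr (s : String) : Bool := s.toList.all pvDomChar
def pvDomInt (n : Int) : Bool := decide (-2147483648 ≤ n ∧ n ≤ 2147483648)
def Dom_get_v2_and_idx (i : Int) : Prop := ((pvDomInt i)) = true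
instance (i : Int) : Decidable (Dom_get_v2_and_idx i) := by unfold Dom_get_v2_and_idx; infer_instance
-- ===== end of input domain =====

-- B replaces A's halving loop by the closed-form bit trick i & -i (lowest set bit) + bit_length; equal on all i ≠ 0 (on i = 0 A's loop never terminates).


-- ===== PORT A =====
-- the while-loop of A; fuel only makes it total (for i ≠ 0 the loop runs at most
-- natAbs i times, so fuel natAbs i + 1 is never exhausted — exact on Pre_)
def getV2Loop (fuel : Nat) (v2 : Int) (i_copy : Int) (tp : Int) : Int × Int × Int :=
  match fuel with
  | 0 => (v2, i_copy, tp)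
  | fuel + 1 =>
    if PySem.Int.mod i_copy 2 = 0 then
      getV2Loop fuel (v2 + 1) (PySem.Int.floordiv i_copy 2) (tp * 2)
    else (v2, i_copy, tp)

def get_v2_and_idx (i : Int) : Int × Int :=
  let r := getV2Loop (i.natAbs + 1) 0 i 1
  (r.1, i - r.2.2)

-- ===== PORT B =====
def get_v2_and_idx_alt (i : Int) : Int × Int :=
  let tp := PySem.Int.band i (-i)
  ((PySem.Int.bitLength tp : Int) - 1, i - tp)

-- ===== PRECONDITION & SPEC =====
-- Pre_ excludes exactly i = 0, on which A's while-loop never terminates (i_copy stays 0).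
def Pre_get_v2_and_idx (i : Int) : Prop := i ≠ 0
instance (i : Int) : Decidable (Pre_get_v2_and_idx i) := by unfold Pre_get_v2_and_idx; infer_instance
def pvWitness_get_v2_and_idx : Int := 12

def Spec_get_v2_and_idx (i : Int) (out : Int × Int) : Prop := out = get_v2_and_idx_alt i
instance (i : Int) (out : Int × Int) : Decidable (Spec_get_v2_and_idx i out) := by unfold Spec_get_v2_and_idx; infer_instance

-- ===== CLAIM (what is proved, stated in full; the proofs are below) =====
def Claim_equal_get_v2_and_idx : Prop := ∀ (i : Int), Dom_get_v2_and_idx i → Pre_get_v2_and_idx i → Spec_get_v2_and_idx i (get_v2_and_idx i)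

-- ===== LEMMAS AND PROOFS =====

-- Nat-level bit trick: for n = 2^k * o with o odd, n &&& (n-1) clears the lowest set bit.
theorem nat_and_pred (k : Nat) : ∀ (o : Nat), o % 2 = 1 →
    (2 ^ k * o) &&& (2 ^ k * o - 1) = 2 ^ k * o - 2 ^ k := by
  induction k with
  | zero =>
    intro o ho
    obtain ⟨t, rfl⟩ : ∃ t, o = 2 * t + 1 := ⟨o / 2, by omega⟩
    have e1 : 2 * t + 1 = Nat.bit true t := by simp [Nat.bit]
    have e0 : 2 * t = Nat.bit false t := by simp [Nat.bit]
    simp only [pow_zero, one_mul]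
    rw [show 2 * t + 1 - 1 = 2 * t by omega, e1, e0, Nat.land_bit]
    simp
  | succ k ih =>
    intro o ho
    have hn1 : 1 ≤ 2 ^ k * o :=
      Nat.one_le_iff_ne_zero.mpr (Nat.mul_ne_zero (by positivity) (by omega))
    have hk : 2 ^ k ≤ 2 ^ k * o := Nat.le_mul_of_pos_right _ (by omega)
    have e2 : 2 ^ (k + 1) * o = 2 * (2 ^ k * o) := by ring
    rw [e2]
    have h1 : 2 * (2 ^ k * o) - 1 = Nat.bit true (2 ^ k * o - 1) := by
      simp [Nat.bit]; omega
    have h0 : 2 * (2 ^ k * o) = Nat.bit false (2 ^ k * o) := by simp [Nat.bit]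
    rw [h1, h0, Nat.land_bit, ih o ho]
    simp [Nat.bit]
    omega

-- PySem.Int.band of a positive n with -n, in terms of Nat bit operations.
theorem band_pos_neg (n : Nat) (hn : 0 < n) :
    PySem.Int.band (n : Int) (-(n : Int)) = ((n - (n &&& (n - 1)) : Nat) : Int) := by
  rw [PySem.Int.band.eq_1]
  have h1 : ¬ (0 : Int) ≤ -(n : Int) := by omega
  have h2 : (0 : Int) ≤ (n : Int) := Int.natCast_nonneg n
  rw [if_pos h2, if_neg h1]
  have h3 : (-(-(n : Int)) - 1).toNat = n - 1 := by omega
  have h4 : ((n : Int)).toNat = n := by omega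
  rw [h3, h4]

-- band i (-i) = 2^k when natAbs i = 2^k * o with o odd.
theorem band_lowbit (i : Int) (k o : Nat) (ho : o % 2 = 1) (hi : i.natAbs = 2 ^ k * o) :
    PySem.Int.band i (-i) = (2 : Int) ^ k := by
  have hn : 0 < 2 ^ k * o := Nat.mul_pos (Nat.two_pow_pos k) (by omega)
  have key : PySem.Int.band ((2 ^ k * o : Nat) : Int) (-((2 ^ k * o : Nat) : Int)) = (2 : Int) ^ k := by
    rw [band_pos_neg _ hn, nat_and_pred k o ho]
    have hk : 2 ^ k ≤ 2 ^ k * o := Nat.le_mul_of_pos_right _ (by omega)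
    push_cast [Nat.sub_sub_self hk]
    rfl
  rcases Int.natAbs_eq i with h | h
  · rw [hi] at h; rw [h]; exact key
  · rw [hi] at h
    rw [h, neg_neg, PySem.Int.band_comm]
    exact key

theorem bitLength_two_pow (k : Nat) : PySem.Int.bitLength ((2 : Int) ^ k) = k + 1 := by
  induction k with
  | zero => simpa using (by decide : PySem.Int.bitLength (1 : Int) = 1)
  | succ k ih =>
    have hcast : ((2 : Int) ^ (k + 1)) = ((2 ^ (k + 1) : Nat) : Int) := by push_cast; ring
    have hc2 : ((2 : Int) ^ k) = ((2 ^ k : Nat) : Int) := by push_cast; ring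
    rw [hcast, PySem.Int.bitLength_natCast (m := 2 ^ (k + 1)) (by positivity)]
    have hhalf : 2 ^ (k + 1) / 2 = 2 ^ k := by omega
    rw [hhalf, ← hc2, ih]

-- the loop runs exactly k times on input 2^k * m with m odd
theorem getV2Loop_spec (k : Nat) : ∀ (m v2 tp : Int) (fuel : Nat), ¬ (2 ∣ m) → k ≤ fuel →
    getV2Loop fuel v2 (2 ^ k * m) tp = (v2 + k, m, tp * 2 ^ k) := by
  induction k with
  | zero =>
    intro m v2 tp fuel hm _
    have hmod : PySem.Int.mod m 2 ≠ 0 := by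
      rw [Ne, PySem.Int.mod_eq_zero_iff_dvd]; exact hm
    cases fuel with
    | zero => simp [getV2Loop]
    | succ f =>
      simp only [getV2Loop, pow_zero, one_mul]
      rw [if_neg hmod]
      simp
  | succ k ih =>
    intro m v2 tp fuel hm hfuel
    cases fuel with
    | zero => omega
    | succ f =>
      have hdvd : (2 : Int) ∣ 2 ^ (k + 1) * m := ⟨2 ^ k * m, by ring⟩
      have hmod : PySem.Int.mod (2 ^ (k + 1) * m) 2 = 0 :=
        (PySem.Int.mod_eq_zero_iff_dvd _ _).mpr hdvd
      have hdiv : PySem.Int.floordiv (2 ^ (k + 1) * m) 2 = 2 ^ k * m := by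
        rw [PySem.Int.floordiv_eq_ediv_of_pos (by omega)]
        rw [show (2 : Int) ^ (k + 1) * m = 2 * (2 ^ k * m) by ring,
            Int.mul_ediv_cancel_left _ (by omega)]
      simp only [getV2Loop, hmod, if_true, hdiv]
      rw [ih m (v2 + 1) (tp * 2) f hm (by omega)]
      refine Prod.ext ?_ (Prod.ext rfl ?_) <;> push_cast <;> ring

-- ===== VERDICT (by name: the statement is the Claim_ definition above) =====
theorem get_v2_and_idx_spec : Claim_equal_get_v2_and_idx := by
  intro i _ hpre
  unfold Spec_get_v2_and_idx
  simp only [get_v2_and_idx, get_v2_and_idx_alt]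
  have hn0 : i.natAbs ≠ 0 := by simpa [Int.natAbs_eq_zero] using hpre
  obtain ⟨k, o, hodd, hfac⟩ := Nat.exists_eq_pow_mul_and_not_dvd hn0 2 (by norm_num)
  have ho : o % 2 = 1 := by omega
  have hk_le : k ≤ i.natAbs + 1 := by
    have h1 : k < 2 ^ k := Nat.lt_two_pow_self
    have h2 : 2 ^ k ≤ 2 ^ k * o := Nat.le_mul_of_pos_right _ (by omega)
    omega
  have hband : PySem.Int.band i (-i) = (2 : Int) ^ k := band_lowbit i k o ho hfac
  have hloop : (getV2Loop (i.natAbs + 1) 0 i 1).1 = (k : Int) ∧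
      (getV2Loop (i.natAbs + 1) 0 i 1).2.2 = 2 ^ k := by
    rcases Int.natAbs_eq i with h | h
    · have hi : i = 2 ^ k * (o : Int) := by rw [h, hfac]; push_cast; ring
      have hm : ¬ ((2 : Int) ∣ (o : Int)) := by
        rw [show ((2 : Int)) = ((2 : Nat) : Int) from rfl, Int.natCast_dvd_natCast]
        omega
      rw [show getV2Loop (i.natAbs + 1) 0 i 1
            = getV2Loop (i.natAbs + 1) 0 (2 ^ k * (o : Int)) 1 by rw [← hi],
          getV2Loop_spec k (o : Int) 0 1 _ hm (by omega)]
      simp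
    · have hi : i = 2 ^ k * (-(o : Int)) := by rw [h, hfac]; push_cast; ring
      have hm : ¬ ((2 : Int) ∣ -(o : Int)) := by
        rw [Int.dvd_neg, show ((2 : Int)) = ((2 : Nat) : Int) from rfl,
            Int.natCast_dvd_natCast]
        omega
      rw [show getV2Loop (i.natAbs + 1) 0 i 1
            = getV2Loop (i.natAbs + 1) 0 (2 ^ k * (-(o : Int))) 1 by rw [← hi],
          getV2Loop_spec k (-(o : Int)) 0 1 _ hm (by omega)]
      simp
  rw [hband, bitLength_two_pow k]
  refine Prod.ext ?_ ?_
  · simp only [hloop.1]; push_cast; ring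
  · simpa using congrArg (fun t => i - t) hloop.2
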